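-- pv_equiv track=rewrite | github.com/longmatys/Advent-of-Code-2023 | day 13.py | najdi_zrcadlo
-- ===== SOURCE A (Python) =====
-- def najdi_zrcadlo(line):
--     return_set = set()
--     for i in range(1,int(len(line))):
--         part_r = line[i:2*i]
--         part_r.reverse()
--         if line[0:i] == part_r:
--             return_set.add(i)
--         part_r = line[len(line)-2*i:len(line)-i]
--         part_r.reverse()
--         if line[len(line)-i:] == part_r:
--             return_set.add(len(line)-i)
--
--     return return_set
-- ===== SOURCE B (Python) =====
-- def najdi_zrcadlo(line):
--     # Manacher (even-length centres): rad[c] = half-length of the longest even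
--     # palindrome centred between c-1 and c; an axis is any centre whose palindrome
--     # reaches the left or the right edge of line.
--     n = len(line)
--     rad = [0] * (n + 1)
--     C = 0   # centre of the palindrome with the rightmost known end
--     R = 0   # that palindrome's right end: R = C + rad[C]
--     for c in range(1, n):
--         k = min(rad[2 * C - c], R - c) if c < R else 0
--         while k < c and c + k < n and line[c - 1 - k] == line[c + k]:
--             k += 1
--         rad[c] = k
--         if c + k > R:
--             C = c
--             R = c + k
--     axes = set()
--     for i in range(1, n):
--         if rad[i] == i:          # mirror axis i reaching the left edge
--             axes.add(i)
--         if rad[n - i] == i:      # mirror axis n-i reaching the right edge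
--             axes.add(n - i)
--     return axes
-- ===== Notes on version B (the rewrite author's own statement) =====
-- stated objective: faster
-- what changed: Instead of building, reversing and comparing two list slices for every candidate axis (quadratic always), B runs Manacher's algorithm for even-length palindrome centres (centre expansion reusing mirrored radii) in one linear pass and then reads each axis off the radius table.
import Mathlib
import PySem

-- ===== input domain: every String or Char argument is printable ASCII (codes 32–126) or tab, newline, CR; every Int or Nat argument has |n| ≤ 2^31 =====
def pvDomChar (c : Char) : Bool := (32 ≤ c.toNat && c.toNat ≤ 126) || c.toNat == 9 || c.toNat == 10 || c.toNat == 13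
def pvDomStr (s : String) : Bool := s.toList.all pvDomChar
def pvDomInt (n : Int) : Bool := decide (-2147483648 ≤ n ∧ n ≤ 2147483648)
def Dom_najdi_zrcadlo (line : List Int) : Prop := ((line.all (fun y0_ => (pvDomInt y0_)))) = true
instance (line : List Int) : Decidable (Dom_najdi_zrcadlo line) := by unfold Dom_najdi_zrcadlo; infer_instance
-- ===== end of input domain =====

-- B replaces A's per-axis slice+reverse+compare (quadratic) by Manacher's even-centre expansion: one linear pass over centres, then the axes are read off the radius table.


-- ===== PORT A =====
def najdi_zrcadlo (line : List Int) : List Int :=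
  let n : Int := PySem.List.len line
  (PySem.List.pyRange 1 n 1).foldl (fun return_set i =>
    let part_r := (PySem.List.slice line (some i) (some (2*i))).reverse
    let return_set :=
      if PySem.List.slice line (some 0) (some i) = part_r then PySem.Set.add return_set i
      else return_set
    let part_r := (PySem.List.slice line (some (n - 2*i)) (some (n - i))).reverse
    if PySem.List.slice line (some (n - i)) none = part_r then PySem.Set.add return_set (n - i)
    else return_set) PySem.Set.empty

-- ===== PORT B =====
def pvReachLoop (line : List Int) (c : Int) (k : Int) : Nat → Int
  | 0 => k
  | fuel + 1 =>
    if k < c ∧ c + k < PySem.List.len line ∧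
        PySem.List.pyGet? line (c - 1 - k) = PySem.List.pyGet? line (c + k) then
      pvReachLoop line c (k + 1) fuel
    else k

def pvManacherStep (line : List Int) (st : List Int × Int × Int) (c : Int) :
    List Int × Int × Int :=
  let rad := st.1
  let C := st.2.1
  let R := st.2.2
  let k0 := if c < R then min (PySem.List.pyGetD rad (2*C - c) 0) (R - c) else 0
  let k := pvReachLoop line c k0 (c - k0).toNat
  let rad := PySem.List.pySetD rad c k
  if c + k > R then (rad, c, c + k) else (rad, C, R)

def najdi_zrcadlo_alt (line : List Int) : List Int :=
  let n : Int := PySem.List.len line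
  let st := (PySem.List.pyRange 1 n 1).foldl (pvManacherStep line)
    (PySem.List.pyRepeat [0] (n+1), 0, 0)
  let rad := st.1
  (PySem.List.pyRange 1 n 1).foldl (fun axes i =>
    let axes := if PySem.List.pyGetD rad i 0 = i then PySem.Set.add axes i else axes
    if PySem.List.pyGetD rad (n - i) 0 = i then PySem.Set.add axes (n - i) else axes)
    PySem.Set.empty


-- ===== PRECONDITION & SPEC =====
def Spec_najdi_zrcadlo (line : List Int) (out : List Int) : Prop := out = najdi_zrcadlo_alt line
instance (line : List Int) (out : List Int) : Decidable (Spec_najdi_zrcadlo line out) := by unfold Spec_najdi_zrcadlo; infer_instance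

-- ===== CLAIM (what is proved, stated in full; the proofs are below) =====
def Claim_equal_najdi_zrcadlo : Prop := ∀ (line : List Int), Dom_najdi_zrcadlo line → Spec_najdi_zrcadlo line (najdi_zrcadlo line)

-- ===== LEMMAS AND PROOFS =====

def pvG (line : List Int) (c : Int) (k : Int) : Prop :=
  k < c ∧ c + k < PySem.List.len line ∧
    PySem.List.pyGet? line (c - 1 - k) = PySem.List.pyGet? line (c + k)

def pvReach (line : List Int) (c : Int) : Int :=
  pvReachLoop line c 0 c.toNat

lemma pvReachLoop_char (line : List Int) (c : Int) :
    ∀ (fuel : Nat) (k : Int), (∀ j, pvG line c j → j < k + fuel) →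
      k ≤ pvReachLoop line c k fuel ∧
      (∀ j, k ≤ j → j < pvReachLoop line c k fuel → pvG line c j) ∧
      ¬ pvG line c (pvReachLoop line c k fuel) := by
  intro fuel
  induction fuel with
  | zero =>
    intro k h
    simp only [pvReachLoop]
    refine ⟨le_refl _, fun j hj1 hj2 => absurd hj2 (by omega), fun hG => ?_⟩
    have := h _ hG; omega
  | succ fuel ih =>
    intro k h
    by_cases hG : pvG line c k
    · have hstep : pvReachLoop line c k (fuel+1) = pvReachLoop line c (k+1) fuel := by
        simp only [pvReachLoop]
        rw [if_pos (show _ ∧ _ ∧ _ from hG)]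
      obtain ⟨h1, h2, h3⟩ := ih (k+1) (by intro j hj; have := h j hj; omega)
      rw [hstep]
      refine ⟨by omega, ?_, h3⟩
      intro j hj1 hj2
      by_cases hjk : j = k
      · exact hjk ▸ hG
      · exact h2 j (by omega) hj2
    · have hstep : pvReachLoop line c k (fuel+1) = k := by
        simp only [pvReachLoop]
        rw [if_neg (show ¬(_ ∧ _ ∧ _) from hG)]
      rw [hstep]
      exact ⟨le_refl _, fun j hj1 hj2 => absurd hj2 (by omega), hG⟩

-- pvReach's defining facts: nonnegative, guard holds below it, fails at it
lemma pvReach_props (line : List Int) (c : Int) :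
    0 ≤ pvReach line c ∧
    (∀ j, 0 ≤ j → j < pvReach line c → pvG line c j) ∧
    ¬ pvG line c (pvReach line c) := by
  obtain ⟨h1, h2, h3⟩ := pvReachLoop_char line c c.toNat 0
    (by intro j hj; have := hj.1; omega)
  exact ⟨h1, fun j hj0 hj1 => h2 j hj0 hj1, h3⟩

lemma pvReach_le (line : List Int) (c : Int) (hc : 0 ≤ c) : pvReach line c ≤ c := by
  obtain ⟨h1, h2, h3⟩ := pvReach_props line c
  by_contra hlt
  exact absurd (h2 c hc (by omega)).1 (lt_irrefl c)

-- starting the expansion at any verified lower bound gives the same result as from 0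
lemma pvReachFrom_eq (line : List Int) (c k : Int) (h0 : 0 ≤ k) (hkc : k ≤ c)
    (hG : ∀ j, 0 ≤ j → j < k → pvG line c j) :
    pvReachLoop line c k (c - k).toNat = pvReach line c := by
  obtain ⟨h1, h2, h3⟩ := pvReachLoop_char line c (c - k).toNat k
    (by intro j hj; have := hj.1; omega)
  obtain ⟨g1, g2, g3⟩ := pvReach_props line c
  by_contra hne
  rcases lt_or_gt_of_ne hne with hlt | hgt
  · -- pvReachLoop … < pvReach: guard holds at the loop's result, contradiction
    exact h3 (g2 _ (by omega) hlt)
  · -- pvReach < pvReachLoop …: guard holds at pvReach, contradiction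
    by_cases hk : pvReach line c < k
    · exact g3 (hG _ g1 hk)
    · exact g3 (h2 _ (by omega) hgt)

-- Manacher's mirror step: inside a known palindrome centred at C, the guard at centre c
-- holds up to min(radius of the mirrored centre, distance to the palindrome's right end)
lemma pvMirror (line : List Int) (C c j : Int) (hC : 0 ≤ C) (hCc : C < c)
    (hcR : c < C + pvReach line C) (hj : 0 ≤ j)
    (hj1 : j < pvReach line (2*C - c)) (hj2 : j < C + pvReach line C - c) :
    pvG line c j := by
  obtain ⟨pC0, pC, _⟩ := pvReach_props line C
  obtain ⟨p'0, p', _⟩ := pvReach_props line (2*C - c)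
  have hKC : pvReach line C ≤ C := pvReach_le line C hC
  set K := pvReach line C with hK
  -- R ≤ length: the guard at K-1 puts C + K - 1 inside the list
  have hRn : C + K ≤ PySem.List.len line := by
    have := (pC (K-1) (by omega) (by omega)).2.1
    omega
  refine ⟨by omega, by omega, ?_⟩
  -- the pair (c'-1-j, c+j) mirrors to the guard of C at c-C+j
  have e1 := (pC (c - C + j) (by omega) (by omega)).2.2
  have e1' : C - 1 - (c - C + j) = 2*C - c - 1 - j := by ring
  have e1'' : C + (c - C + j) = c + j := by ring
  rw [e1', e1''] at e1
  -- the guard of the mirrored centre at j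
  have e2 := (p' j hj hj1).2.2
  -- the pair (c-1-j, c'+j) mirrors to the guard of C at ±(C-c+j)
  by_cases hs : 0 ≤ C - c + j
  · have e3 := (pC (C - c + j) hs (by omega)).2.2
    have e3' : C - 1 - (C - c + j) = c - 1 - j := by ring
    have e3'' : C + (C - c + j) = 2*C - c + j := by ring
    rw [e3', e3''] at e3
    calc PySem.List.pyGet? line (c - 1 - j) = PySem.List.pyGet? line (2*C - c + j) := e3
      _ = PySem.List.pyGet? line (2*C - c - 1 - j) := e2.symm
      _ = PySem.List.pyGet? line (c + j) := e1
  · have e3 := (pC (c - C - j - 1) (by omega) (by omega)).2.2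
    have e3' : C - 1 - (c - C - j - 1) = 2*C - c + j := by ring
    have e3'' : C + (c - C - j - 1) = c - 1 - j := by ring
    rw [e3', e3''] at e3
    calc PySem.List.pyGet? line (c - 1 - j) = PySem.List.pyGet? line (2*C - c + j) := e3.symm
      _ = PySem.List.pyGet? line (2*C - c - 1 - j) := e2.symm
      _ = PySem.List.pyGet? line (c + j) := e1

def pvInvariant (line : List Int) (c : Int) (st : List Int × Int × Int) : Prop :=
  st.1.length = line.length + 1 ∧
  (∀ t : Int, 0 ≤ t → t < c → PySem.List.pyGetD st.1 t 0 = pvReach line t) ∧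
  0 ≤ st.2.1 ∧ st.2.1 < c ∧ st.2.2 = st.2.1 + pvReach line st.2.1

lemma pvInv_step (line : List Int) (c : Int) (st : List Int × Int × Int)
    (h1 : 1 ≤ c) (h2 : c < (line.length : Int)) (hinv : pvInvariant line c st) :
    pvInvariant line (c+1) (pvManacherStep line st c) := by
  obtain ⟨hlen, hrad, hC0, hCc, hR⟩ := hinv
  set rad := st.1 with hrdef
  set C := st.2.1 with hCdef
  set R := st.2.2 with hRdef
  have hKC : pvReach line C ≤ C := pvReach_le line C hC0
  have hk0 : ∀ k0 : Int, 0 ≤ k0 → k0 ≤ c → (∀ j, 0 ≤ j → j < k0 → pvG line c j) →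
      pvReachLoop line c k0 (c - k0).toNat = pvReach line c :=
    fun k0 a b g => pvReachFrom_eq line c k0 a b g
  -- the starting radius is a verified lower bound
  have hmain : pvReachLoop line c
      (if c < R then min (PySem.List.pyGetD rad (2*C - c) 0) (R - c) else 0)
      (c - (if c < R then min (PySem.List.pyGetD rad (2*C - c) 0) (R - c) else 0)).toNat
      = pvReach line c := by
    by_cases hcR : c < R
    · rw [if_pos hcR]
      have hmir : PySem.List.pyGetD rad (2*C - c) 0 = pvReach line (2*C - c) := by
        apply hrad <;> omega
      rw [hmir]
      have hr0 := (pvReach_props line (2*C - c)).1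
      apply hk0
      · omega
      · have := pvReach_le line (2*C - c) (by omega)
        omega
      · intro j hj0 hj1
        exact pvMirror line C c j hC0 hCc (by omega) hj0 (by omega) (by omega)
    · rw [if_neg hcR]
      exact hk0 0 le_rfl (by omega) (by omega)
  unfold pvManacherStep
  simp only [← hrdef, ← hCdef, ← hRdef, hmain]
  have hlen' : (PySem.List.pySetD rad c (pvReach line c)).length = line.length + 1 := by
    rw [PySem.List.pySetD_of_nonneg rad _ (by omega), List.length_set]; exact hlen
  have hrad' : ∀ t : Int, 0 ≤ t → t < c + 1 →
      PySem.List.pyGetD (PySem.List.pySetD rad c (pvReach line c)) t 0 = pvReach line t := by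
    intro t ht0 htc
    rw [PySem.List.pySetD_of_nonneg rad _ (by omega),
        PySem.List.pyGetD_eq_getElem _ 0 ht0 (by rw [List.length_set]; omega),
        List.getElem_set]
    by_cases hte : t = c
    · rw [if_pos (by omega)]
      rw [hte]
    · rw [if_neg (by omega)]
      rw [← PySem.List.pyGetD_eq_getElem rad 0 ht0 (by omega)]
      exact hrad t ht0 (by omega)
  by_cases hup : c + pvReach line c > R
  · rw [if_pos hup]
    refine ⟨hlen', hrad', ?_, ?_, ?_⟩ <;> dsimp only <;> omega
  · rw [if_neg hup]
    exact ⟨hlen', hrad', hC0, by dsimp only; omega, hR⟩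

lemma pvInv_fold (line : List Int) :
    ∀ (c : Int), 1 ≤ c → c ≤ (line.length : Int) →
      pvInvariant line c ((PySem.List.pyRange 1 c 1).foldl (pvManacherStep line)
        (PySem.List.pyRepeat [0] ((line.length : Int)+1), 0, 0)) := by
  intro c hc
  induction c, hc using Int.le_induction with
  | base =>
    intro hn
    rw [PySem.List.pyRange_one_eq_nil (by omega)]
    simp only [List.foldl_nil]
    refine ⟨?_, ?_, le_refl 0, by dsimp only; omega, by dsimp only; simp [pvReach, pvReachLoop]⟩
    · dsimp only
      rw [PySem.List.pyRepeat_singleton]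
      simp only [List.length_replicate]
      omega
    · intro t ht0 ht1
      have ht : t = 0 := by omega
      dsimp only
      rw [ht, PySem.List.pyRepeat_singleton,
          PySem.List.pyGetD_eq_getElem _ 0 (le_refl 0) (by simp)]
      simp only [Int.toNat_zero, List.getElem_replicate]
      simp [pvReach, pvReachLoop]
  | succ c hc ih =>
    intro hn
    rw [PySem.List.pyRange_one_succ_right (by omega), List.foldl_append, List.foldl_cons,
        List.foldl_nil]
    exact pvInv_step line c _ hc (by omega) (ih (by omega))

-- pvReach = i exactly when the guard holds on all of [0, i), provided it fails at i itself
lemma pvReach_eq_iff (line : List Int) (c i : Int) (hi : 0 ≤ i) (hni : ¬ pvG line c i) :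
    pvReach line c = i ↔ (∀ j, 0 ≤ j → j < i → pvG line c j) := by
  obtain ⟨g1, g2, g3⟩ := pvReach_props line c
  constructor
  · intro he j hj0 hji
    exact g2 j hj0 (by omega)
  · intro hall
    by_contra hne
    rcases lt_or_gt_of_ne hne with hlt | hgt
    · exact g3 (hall _ g1 hlt)
    · exact hni (g2 i hi hgt)

-- a length-m segment equals the reverse of the adjacent length-m segment iff the
-- corresponding symmetric element pairs around their common boundary are equal
lemma seg_pal_iff (l : List Int) (a m : Nat) (hm : 1 ≤ m) (h : a + 2*m ≤ l.length) :
    ((l.drop a).take m = ((l.drop (a+m)).take m).reverse) ↔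
      ∀ k, k < m → l[a+m-1-k]? = l[a+m+k]? := by
  have hA : ∀ j, j < m → ((l.drop a).take m)[j]? = l[a+j]? := by
    intro j hj; rw [List.getElem?_take_of_lt hj, List.getElem?_drop]
  have hlen2 : ((l.drop (a+m)).take m).length = m := by
    simp [List.length_take, List.length_drop]; omega
  have hB : ∀ j, j < m → (((l.drop (a+m)).take m).reverse)[j]? = l[a+2*m-1-j]? := by
    intro j hj
    rw [List.getElem?_reverse (by simp [hlen2]; omega), hlen2,
        List.getElem?_take_of_lt (by omega), List.getElem?_drop]
    congr 1; omega
  constructor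
  · intro he k hk
    have := congrArg (fun t => t[m-1-k]?) he
    simp only at this
    rw [hA _ (by omega), hB _ (by omega)] at this
    have e1 : a + (m-1-k) = a+m-1-k := by omega
    have e2 : a+2*m-1-(m-1-k) = a+m+k := by omega
    rwa [e1, e2] at this
  · intro hp
    apply List.ext_getElem?
    intro j
    by_cases hj : j < m
    · rw [hA _ hj, hB _ hj]
      have := hp (m-1-j) (by omega)
      have e1 : a+m-1-(m-1-j) = a+j := by omega
      have e2 : a+m+(m-1-j) = a+2*m-1-j := by omega
      rw [e1, e2] at this
      exact this
    · rw [List.getElem?_eq_none, List.getElem?_eq_none]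
      · simp [hlen2]; omega
      · simp [List.length_take, List.length_drop]; omega

-- A's prefix-mirror slice condition at i, as the guard holding on all of [0, i)
lemma pv_left_core (line : List Int) (i : Int) (h1 : 1 ≤ i) (h2 : i < (line.length : Int)) :
    (PySem.List.slice line (some 0) (some i) =
      (PySem.List.slice line (some i) (some (2*i))).reverse) ↔
      (∀ j, 0 ≤ j → j < i → pvG line i j) := by
  set n := line.length with hn
  set m := i.toNat with hm
  simp only [pvG, PySem.List.len_eq, ← hn]
  by_cases hle : 2*i ≤ (n : Int)
  · rw [PySem.List.slice_toNat line (le_refl 0) (by omega),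
        PySem.List.slice_toNat line (by omega) (by omega)]
    have e2 : (2*i).toNat - m = m := by omega
    have e0 : (0:Int).toNat = 0 := rfl
    rw [e0, e2]
    have hseg := seg_pal_iff line 0 m (by omega) (by omega)
    simp only [Nat.zero_add, List.drop_zero] at hseg
    have em : m - 0 = m := by omega
    rw [em]
    simp only [List.drop_zero, ← hm]
    rw [hseg]
    constructor
    · intro hp j hj0 hji
      refine ⟨hji, by omega, ?_⟩
      rw [PySem.List.pyGet?_of_nonneg line (by omega),
          PySem.List.pyGet?_of_nonneg line (by omega)]
      have e3 : (i-1-j).toNat = m-1-j.toNat := by omega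
      have e4 : (i+j).toNat = m + j.toNat := by omega
      rw [e3, e4]
      exact hp j.toNat (by omega)
    · intro hq k hk
      have h5 := (hq (k:Int) (by omega) (by omega)).2.2
      rw [PySem.List.pyGet?_of_nonneg line (by omega),
          PySem.List.pyGet?_of_nonneg line (by omega)] at h5
      have e3 : (i-1-(k:Int)).toNat = m-1-k := by omega
      have e4 : (i+(k:Int)).toNat = m + k := by omega
      rwa [e3, e4] at h5
  · constructor
    · intro he
      exfalso
      have hlen := congrArg List.length he
      rw [PySem.List.slice_toNat line (le_refl 0) (by omega),
          PySem.List.slice_toNat line (by omega) (by omega)] at hlen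
      simp only [List.length_reverse, List.length_take, List.length_drop] at hlen
      omega
    · intro hq
      exfalso
      have := (hq ((n:Int) - i) (by omega) (by omega)).2.1
      omega

-- A's suffix-mirror slice condition at i, as the guard at centre n - i holding on [0, i)
lemma pv_right_core (line : List Int) (i : Int) (h1 : 1 ≤ i) (h2 : i < (line.length : Int)) :
    (PySem.List.slice line (some ((line.length : Int) - i)) none =
      (PySem.List.slice line (some ((line.length : Int) - 2*i))
        (some ((line.length : Int) - i))).reverse) ↔
      (∀ j, 0 ≤ j → j < i → pvG line ((line.length : Int) - i) j) := by
  set n := line.length with hn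
  set m := i.toNat with hm
  simp only [pvG, PySem.List.len_eq, ← hn]
  by_cases hle : 2*i ≤ (n : Int)
  · rw [PySem.List.slice_from line (by omega),
        PySem.List.slice_toNat line (by omega) (by omega)]
    have ea : ((n:Int)-i).toNat = n - m := by omega
    have eb : ((n:Int)-2*i).toNat = n - 2*m := by omega
    have ec : (n - m) - (n - 2*m) = m := by omega
    rw [ea, eb, ec]
    have hXfull : (line.drop (n-m)).take m = line.drop (n-m) := by
      apply List.take_of_length_le
      simp only [List.length_drop, ← hn]
      omega
    have hseg := seg_pal_iff line (n-2*m) m (by omega) (by omega)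
    have ed : n-2*m+m = n-m := by omega
    rw [ed] at hseg
    rw [eq_comm, List.reverse_eq_iff, ← hXfull, hseg]
    constructor
    · intro hp j hj0 hji
      refine ⟨by omega, by omega, ?_⟩
      rw [PySem.List.pyGet?_of_nonneg line (by omega),
          PySem.List.pyGet?_of_nonneg line (by omega)]
      have e3 : ((n:Int)-i-1-j).toNat = n-m-1-j.toNat := by omega
      have e4 : ((n:Int)-i+j).toNat = n-m + j.toNat := by omega
      rw [e3, e4]
      exact hp j.toNat (by omega)
    · intro hq k hk
      have h5 := (hq (k:Int) (by omega) (by omega)).2.2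
      rw [PySem.List.pyGet?_of_nonneg line (by omega),
          PySem.List.pyGet?_of_nonneg line (by omega)] at h5
      have e3 : ((n:Int)-i-1-(k:Int)).toNat = n-m-1-k := by omega
      have e4 : ((n:Int)-i+(k:Int)).toNat = n-m + k := by omega
      rwa [e3, e4] at h5
  · constructor
    · intro he
      exfalso
      have hnil : PySem.List.slice line (some ((n:Int)-2*i)) (some ((n:Int)-i)) = [] := by
        simp only [PySem.List.slice, PySem.List.clampIdx, ← hn]
        rw [List.take_eq_nil_iff]
        left
        split_ifs <;> omega
      rw [hnil] at he
      have hlen := congrArg List.length he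
      rw [PySem.List.slice_from line (by omega)] at hlen
      simp only [List.length_drop, List.length_reverse, List.length_nil, ← hn] at hlen
      omega
    · intro hq
      exfalso
      have := (hq ((n:Int) - i) (by omega) (by omega)).1
      omega

lemma pv_left (line : List Int) (i : Int) (h1 : 1 ≤ i) (h2 : i < (line.length : Int)) :
    (PySem.List.slice line (some 0) (some i) =
      (PySem.List.slice line (some i) (some (2*i))).reverse) ↔ pvReach line i = i := by
  rw [pvReach_eq_iff line i i (by omega) (fun hG => absurd hG.1 (lt_irrefl i))]
  exact pv_left_core line i h1 h2

lemma pv_right (line : List Int) (i : Int) (h1 : 1 ≤ i) (h2 : i < (line.length : Int)) :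
    (PySem.List.slice line (some ((line.length : Int) - i)) none =
      (PySem.List.slice line (some ((line.length : Int) - 2*i))
        (some ((line.length : Int) - i))).reverse) ↔
      pvReach line ((line.length : Int) - i) = i := by
  rw [pvReach_eq_iff line ((line.length : Int) - i) i (by omega) (fun hG => by
    have := hG.2.1
    simp only [PySem.List.len_eq] at this
    omega)]
  exact pv_right_core line i h1 h2

-- ===== VERDICT (by name: the statement is the Claim_ definition above) =====
theorem najdi_zrcadlo_spec : Claim_equal_najdi_zrcadlo := by
  intro line _
  unfold Spec_najdi_zrcadlo najdi_zrcadlo najdi_zrcadlo_alt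
  dsimp only
  simp only [PySem.List.len_eq]
  by_cases hn : (line.length : Int) ≤ 1
  · simp only [PySem.List.pyRange_one_eq_nil hn, List.foldl_nil]
  · obtain ⟨hlen, hrad, -, -, -⟩ := pvInv_fold line (line.length : Int) (by omega) le_rfl
    refine PySem.List.foldl_congr_mem _ _ _ _ ?_
    intro acc i hmem
    rw [PySem.List.mem_pyRange_one] at hmem
    simp only [hrad i (by omega) (by omega),
      hrad ((line.length : Int) - i) (by omega) (by omega)]
    simp only [pv_left line i hmem.1 hmem.2, pv_right line i hmem.1 hmem.2]
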